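-- pv_equiv track=rewrite | github.com/CDonners/Homebrew-Base-Conversions | dec_to_bin.py | bin_beautify
-- ===== SOURCE A (Python) =====
-- def bin_beautify(binstr: str):
--     # Adds 0s at the front in order to make the binary string split nicely
--     while len(binstr)%4 != 0:
--         binstr = "0"+binstr
--     # Split the binary string into nibbles to make easier to read for user
--     beautified_bin = ""
--     for i in range(len(binstr)):
--         if i%4 == 0 and i != 0:
--             beautified_bin = beautified_bin + " "
--         beautified_bin = beautified_bin + binstr[i]
--     return beautified_bin
-- ===== SOURCE B (Python) =====
-- def bin_beautify(binstr: str):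
--     pad = (-len(binstr)) % 4
--     s = "0" * pad + binstr
--     return " ".join(s[i:i+4] for i in range(0, len(s), 4))
-- ===== Notes on version B (the rewrite author's own statement) =====
-- stated objective: simpler
-- what changed: Replaces the one-zero-at-a-time padding while-loop and the per-character accumulation with a single computed pad count ((-len)%4) followed by slicing into 4-character chunks joined by spaces.
import Mathlib
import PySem

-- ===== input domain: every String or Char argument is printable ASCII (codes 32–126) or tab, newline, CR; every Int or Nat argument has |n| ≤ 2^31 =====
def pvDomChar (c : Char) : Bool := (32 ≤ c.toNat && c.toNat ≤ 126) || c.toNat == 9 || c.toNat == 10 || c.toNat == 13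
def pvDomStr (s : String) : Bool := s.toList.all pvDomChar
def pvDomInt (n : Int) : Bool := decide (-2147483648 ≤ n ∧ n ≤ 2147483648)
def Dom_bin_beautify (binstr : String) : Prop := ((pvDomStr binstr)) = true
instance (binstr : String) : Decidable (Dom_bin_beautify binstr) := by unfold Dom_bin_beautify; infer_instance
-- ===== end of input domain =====

-- B computes the pad count with (-len) % 4 and joins 4-character chunks, replacing A's
-- one-zero-at-a-time while-loop and per-character accumulation (objective: simpler).

-- ===== PORT A =====
-- while len(binstr)%4 != 0: binstr = "0"+binstr   (fuel 4 only makes the loop total: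
-- at most 3 iterations ever run, the recursion itself stops on len % 4 == 0)
def pvPadA (fuel : Nat) (s : List Char) : List Char :=
  match fuel with
  | 0 => s
  | f + 1 => if s.length % 4 ≠ 0 then pvPadA f ('0' :: s) else s

-- for i in range(len(binstr)): … accumulate characters, a space before every 4th (i ≠ 0)
-- (fuel = number of remaining indices, only to make the loop structural)
def pvBeautGo (s : List Char) (fuel i : Nat) (acc : List Char) : List Char :=
  match fuel with
  | 0 => acc
  | f + 1 =>
    if h : i < s.length then
      pvBeautGo s f (i + 1) ((if i % 4 == 0 && i != 0 then acc ++ [' '] else acc) ++ [s[i]])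
    else acc

def bin_beautify (binstr : String) : String :=
  String.ofList (pvBeautGo (pvPadA 4 binstr.toList) (pvPadA 4 binstr.toList).length 0 [])

-- ===== PORT B =====
-- [s[i:i+4] for i in range(0, len(s), 4)] as the corresponding take/drop recursion
-- (fuel = length of the remaining list, only to make the recursion structural)
def pvChunks (fuel : Nat) (s : List Char) : List (List Char) :=
  match fuel with
  | 0 => []
  | f + 1 => if s = [] then [] else s.take 4 :: pvChunks f (s.drop 4)

def bin_beautify_alt (binstr : String) : String :=
  String.ofList (PySem.Chars.join [' ']
    (pvChunks (List.replicate (PySem.Int.mod (-(binstr.toList.length : Int)) 4).toNat '0' ++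
        binstr.toList).length
      (List.replicate (PySem.Int.mod (-(binstr.toList.length : Int)) 4).toNat '0' ++
        binstr.toList)))

-- ===== PRECONDITION & SPEC =====
def Spec_bin_beautify (binstr : String) (out : String) : Prop := out = bin_beautify_alt binstr
instance (binstr : String) (out : String) : Decidable (Spec_bin_beautify binstr out) := by unfold Spec_bin_beautify; infer_instance

-- ===== CLAIM (what is proved, stated in full; the proofs are below) =====
def Claim_equal_bin_beautify : Prop := ∀ (binstr : String), Dom_bin_beautify binstr → Spec_bin_beautify binstr (bin_beautify binstr)

-- ===== LEMMAS AND PROOFS =====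

theorem pvPadA_eq (s : List Char) :
    pvPadA 4 s = List.replicate ((4 - s.length % 4) % 4) '0' ++ s := by
  rcases (by omega : s.length % 4 = 0 ∨ s.length % 4 = 1 ∨ s.length % 4 = 2 ∨
      s.length % 4 = 3) with h | h | h | h
  · have hk : (4 - s.length % 4) % 4 = 0 := by omega
    simp [pvPadA, h]
  · have e1 : (s.length + 1) % 4 = 2 := by omega
    have e2 : (s.length + 1 + 1) % 4 = 3 := by omega
    have e3 : (s.length + 1 + 1 + 1) % 4 = 0 := by omega
    have hk : (4 - s.length % 4) % 4 = 3 := by omega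
    simp [pvPadA, h, e1, e2, e3, List.replicate]
  · have e1 : (s.length + 1) % 4 = 3 := by omega
    have e2 : (s.length + 1 + 1) % 4 = 0 := by omega
    have hk : (4 - s.length % 4) % 4 = 2 := by omega
    simp [pvPadA, h, e1, e2, List.replicate]
  · have e1 : (s.length + 1) % 4 = 0 := by omega
    have hk : (4 - s.length % 4) % 4 = 1 := by omega
    simp [pvPadA, h, e1]

theorem pvChunks_nil (f : Nat) : pvChunks f [] = [] := by
  cases f <;> simp [pvChunks]

theorem pvChunks_fuel : ∀ (f g : Nat) (s : List Char), s.length ≤ f → s.length ≤ g →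
    pvChunks f s = pvChunks g s := by
  intro f
  induction f with
  | zero =>
    intro g s hf _
    have : s = [] := by
      cases s with
      | nil => rfl
      | cons a t => simp at hf
    subst this; rw [pvChunks_nil, pvChunks_nil]
  | succ f ih =>
    intro g s hf hg
    by_cases hs : s = []
    · subst hs; rw [pvChunks_nil, pvChunks_nil]
    · cases g with
      | zero =>
        exact absurd (Nat.le_zero.mp hg) (fun h => hs (List.eq_nil_of_length_eq_zero h))
      | succ g =>
        have hlen : 0 < s.length := List.length_pos_of_ne_nil hs
        simp only [pvChunks, if_neg hs]
        rw [ih g (s.drop 4) (by simp; omega) (by simp; omega)]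

theorem pvChunks_eq_nil_iff (f : Nat) (s : List Char) (hf : s.length ≤ f) :
    pvChunks f s = [] ↔ s = [] := by
  constructor
  · intro h
    by_contra hs
    cases f with
    | zero => exact hs (List.eq_nil_of_length_eq_zero (Nat.le_zero.mp hf))
    | succ f =>
      rw [pvChunks, if_neg hs] at h
      exact List.cons_ne_nil _ _ h
  · intro h; subst h; exact pvChunks_nil _

theorem pvBeautGo_eq (n : Nat) : ∀ (s : List Char) (i : Nat) (acc : List Char),
    s.length % 4 = 0 → i % 4 = 0 → i ≤ s.length → s.length - i = n →
    pvBeautGo s n i acc =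
      acc ++ (if i ≠ 0 ∧ i < s.length then [' '] else []) ++
        PySem.Chars.join [' '] (pvChunks n (s.drop i)) := by
  induction n using Nat.strong_induction_on with
  | _ n ih =>
    intro s i acc hs hi hile hn
    by_cases hlt : i < s.length
    · -- n ≥ 4: unfold four loop steps and one chunk
      have h4 : i + 4 ≤ s.length := by omega
      have h0 : i < s.length := hlt
      have h1 : i + 1 < s.length := by omega
      have h2 : i + 2 < s.length := by omega
      have h3 : i + 3 < s.length := by omega
      have e1 : (i + 1) % 4 = 1 := by omega
      have e2 : (i + 2) % 4 = 2 := by omega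
      have e3 : (i + 3) % 4 = 3 := by omega
      have i2 : i + 1 + 1 = i + 2 := by omega
      have i3 : i + 2 + 1 = i + 3 := by omega
      have i4 : i + 3 + 1 = i + 4 := by omega
      have hn4 : n = n - 4 + 1 + 1 + 1 + 1 := by omega
      rw [hn4, pvBeautGo, dif_pos h0, pvBeautGo, dif_pos h1, pvBeautGo, dif_pos h2,
          pvBeautGo, dif_pos h3]
      simp only [i2, i3, i4, e1, e2, e3, hi]
      norm_num
      have hrec := ih (n - 4) (by omega) s (i + 4)
        ((if i = 0 then acc else acc ++ [' ']) ++ [s[i], s[i+1], s[i+2], s[i+3]])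
        hs (by omega) (by omega) (by omega)
      rw [hrec]
      -- chunk structure of drop i s
      have hdropcons : s.drop i = s[i] :: s[i+1] :: s[i+2] :: s[i+3] :: s.drop (i + 4) := by
        rw [List.drop_eq_getElem_cons h0, List.drop_eq_getElem_cons h1,
            List.drop_eq_getElem_cons h2, List.drop_eq_getElem_cons h3]
      have hne : s.drop i ≠ [] := by rw [hdropcons]; exact List.cons_ne_nil _ _
      have hchunk : pvChunks (n - 4 + 1 + 1 + 1 + 1) (s.drop i) =
          [s[i], s[i+1], s[i+2], s[i+3]] :: pvChunks (n - 4) (s.drop (i + 4)) := by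
        rw [pvChunks, if_neg hne, hdropcons]
        simp only [List.take, List.drop]
        rw [pvChunks_fuel (n - 4 + 3) (n - 4) (s.drop (i + 4)) (by simp; omega) (by simp; omega)]
      rw [hchunk]
      by_cases hend : i + 4 < s.length
      · have hne4 : pvChunks (n - 4) (s.drop (i + 4)) ≠ [] := by
          rw [Ne, pvChunks_eq_nil_iff (n - 4) _ (by simp; omega), List.drop_eq_nil_iff]
          omega
        obtain ⟨c, cs, hcc⟩ := List.exists_cons_of_ne_nil hne4
        rw [hcc, PySem.Chars.join_cons_cons]
        simp only [hend, hlt, and_true]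
        by_cases hz : i = 0 <;> simp [hz, List.append_assoc]
      · have hlen : i + 4 = s.length := by omega
        have hdnil : s.drop (i + 4) = [] := by rw [List.drop_eq_nil_iff]; omega
        rw [hdnil, pvChunks_nil, PySem.Chars.join_singleton]
        simp only [hend, and_false, if_false, hlt]
        by_cases hz : i = 0 <;> simp [hz, List.append_assoc]
    · -- i = s.length, n = 0
      have hn0 : n = 0 := by omega
      subst hn0
      rw [pvBeautGo]
      have hd : s.drop i = [] := by rw [List.drop_eq_nil_iff]; omega
      simp [hd, pvChunks_nil, PySem.Chars.join_nil, hlt]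

theorem pad_count_eq (n : Nat) :
    (PySem.Int.mod (-(n : Int)) 4).toNat = (4 - n % 4) % 4 := by
  rw [PySem.Int.mod_eq_emod_of_pos (by norm_num)]
  omega

-- ===== VERDICT (by name: the statement is the Claim_ definition above) =====
theorem bin_beautify_spec : Claim_equal_bin_beautify := by
  intro binstr _
  unfold Spec_bin_beautify bin_beautify bin_beautify_alt
  set l := binstr.toList with hl
  rw [pvPadA_eq, pad_count_eq]
  set t := List.replicate ((4 - l.length % 4) % 4) '0' ++ l with ht
  have hlen : t.length % 4 = 0 := by
    rw [ht]; simp only [List.length_append, List.length_replicate]; omega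
  rw [pvBeautGo_eq t.length t 0 [] hlen (by omega) (by omega) (by omega)]
  simp
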